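-- pv_equiv track=rewrite | github.com/SinaBahrami89/RSA-cryptosystem-with-different-prime-generators | aux_fncs.py | slucas
-- ===== SOURCE A (Python) =====
-- import math
--
-- def jacobi(a,b):  #jacobi symbol
--     assert (b>0 and b%2==1) #symbol is only defined when b is positive and odd.
--     x=1
--     while True:
--         if pow(a,1,b)==0:
--             return 0
--         elif a>b or a<0:
--             a=pow(a,1,b)
--         y=-1 if (pow(b,1,8)==3 or pow(b,1,8)==5) else 1
--         while a%2==0:
--             a=a//2
--             x=x*y
--         if a==1:
--             return x*1
--         elif math.gcd(a,b)!=1: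
--             return 0
--         else:
--             z=-1 if pow(a,1,4)==pow(b,1,4)==3 else 1
--             x=x*z
--             a,b=b,a
--
-- def LucasU(n,p,q):  #finds the nth lucas u sequence
--     if n==0:
--         return 0
--     elif n==1:
--         return 1
--     else:
--         x,y,m=0,1,2
--         while n>=m:
--             z=p*y-q*x
--             y,x=z,y
--             m+=1
--         return z
--
-- def LucasV(n,p,q):  #finds the nth lucas v sequence
--     if n==0:
--         return 2
--     elif n==1:
--         return p
--     else:
--         x,y,m=2,p,2
--         while n>=m:
--             z=p*y-q*x
--             y,x=z,y
--             m+=1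
--         return z
--
-- def slucas(n,d,p,q):  # checks if prime based on the strong lucas test. test assumes gcd(n,d)=1 to begin. n is odd.
--     delta=n-jacobi(d,n)
--     exponent=0
--     while pow(delta,1,2)==0:
--         delta=delta//2
--         exponent+=1
--     if pow(LucasU(delta,p,q),1,n)==0:
--         return 'YES'
--     for i in range(exponent+1):
--         if pow(LucasV(delta*2**i,p,q),1,n)==0:
--             return 'YES'
--     return 'NO'
-- ===== SOURCE B (Python) =====
-- import math
--
-- def jacobi(a, b):  # jacobi symbol helper, kept as in the module (B re-implements the Lucas part)
--     assert (b > 0 and b % 2 == 1)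
--     x = 1
--     while True:
--         if pow(a, 1, b) == 0:
--             return 0
--         elif a > b or a < 0:
--             a = pow(a, 1, b)
--         y = -1 if (pow(b, 1, 8) == 3 or pow(b, 1, 8) == 5) else 1
--         while a % 2 == 0:
--             a = a // 2
--             x = x * y
--         if a == 1:
--             return x * 1
--         elif math.gcd(a, b) != 1:
--             return 0
--         else:
--             z = -1 if pow(a, 1, 4) == pow(b, 1, 4) == 3 else 1
--             x = x * z
--             a, b = b, a
--
-- def _upair(k, p, q, n):
--     # (U_k mod n, U_{k+1} mod n) by fast doubling:
--     # U_{2j} = U_j*(2*U_{j+1} - p*U_j),  U_{2j+1} = U_{j+1}^2 - q*U_j^2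
--     if k <= 0:
--         return (0, 1 % n)
--     a, b = _upair(k // 2, p, q, n)
--     u_even = a * (2 * b - p * a) % n
--     u_odd = (b * b - q * a * a) % n
--     if k % 2 == 0:
--         return (u_even, u_odd)
--     return (u_odd, (p * u_odd - q * u_even) % n)
--
-- def slucas(n, d, p, q):
--     delta = n - jacobi(d, n)
--     exponent = 0
--     while delta % 2 == 0:
--         delta //= 2
--         exponent += 1
--     a, b = _upair(delta, p, q, n)
--     if a == 0:
--         return 'YES'
--     for i in range(exponent + 1):
--         a, b = _upair(delta << i, p, q, n)
--         if (2 * b - p * a) % n == 0:   # V_m = 2*U_{m+1} - p*U_m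
--             return 'YES'
--     return 'NO'
-- ===== Notes on version B (the rewrite author's own statement) =====
-- stated objective: faster
-- what changed: B computes the needed Lucas-sequence values U_delta and V_{delta*2^i} modulo n by fast doubling (U_2j = U_j(2U_{j+1}-pU_j), U_2j+1 = U_{j+1}^2-qU_j^2, V_m = 2U_{m+1}-pU_m), O(log n) modular multiplications per test, instead of A's iteration of the recurrence delta times on exact big integers; the jacobi helper and the delta/exponent 2-adic split are kept as in the module.
import Mathlib
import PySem

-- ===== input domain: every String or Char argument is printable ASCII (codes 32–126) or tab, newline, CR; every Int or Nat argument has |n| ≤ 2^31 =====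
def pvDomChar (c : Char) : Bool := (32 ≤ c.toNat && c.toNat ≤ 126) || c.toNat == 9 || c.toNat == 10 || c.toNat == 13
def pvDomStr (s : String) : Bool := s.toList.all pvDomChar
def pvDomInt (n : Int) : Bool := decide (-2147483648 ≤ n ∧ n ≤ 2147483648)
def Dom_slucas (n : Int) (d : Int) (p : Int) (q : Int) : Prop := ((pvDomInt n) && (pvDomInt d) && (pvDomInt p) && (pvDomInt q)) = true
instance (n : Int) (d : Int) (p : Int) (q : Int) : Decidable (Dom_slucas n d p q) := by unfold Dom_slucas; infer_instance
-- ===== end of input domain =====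

-- B changes only the Lucas-sequence computation (fast doubling modulo n instead of
-- iterating the recurrence delta times on exact big integers); the jacobi helper and
-- the delta/exponent decomposition are the module's own and are shared by both ports.

-- ===== SHARED HELPERS (identical code in Source A and Source B: jacobi and the 2-adic split) =====

-- inner loop of jacobi: while a%2==0: a//=2; x*=y   (fuel-guarded for totality;
-- fuel a.natAbs+1 always suffices on inputs where the Python terminates)
def jacInner (y : Int) : Nat → Int → Int → Int × Int
  | 0, a, x => (a, x)
  | f+1, a, x =>
    if PySem.Int.mod a 2 = 0 then jacInner y f (PySem.Int.floordiv a 2) (x * y) else (a, x)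

-- outer while-True loop of jacobi; pow(t,1,m) = t % m (PySem.Int.mod, exact for m ≠ 0).
-- fuel-guarded: each pass ends in a return or swaps (a,b) with strictly smaller b,
-- so fuel b.natAbs+2 suffices whenever the Python returns.
def jacLoop : Nat → Int → Int → Int → Int
  | 0, _, _, _ => 0
  | f+1, a, b, x =>
    if PySem.Int.mod a b = 0 then 0
    else
      let a1 := if a > b ∨ a < 0 then PySem.Int.mod a b else a
      let y : Int := if PySem.Int.mod b 8 = 3 ∨ PySem.Int.mod b 8 = 5 then -1 else 1
      let s := jacInner y (a1.natAbs + 1) a1 x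
      if s.1 = 1 then s.2 * 1
      else if Int.gcd s.1 b ≠ 1 then 0
      else
        let z : Int := if PySem.Int.mod s.1 4 = PySem.Int.mod b 4 ∧ PySem.Int.mod b 4 = 3 then -1 else 1
        jacLoop f b s.1 (s.2 * z)

def jacobi (a : Int) (b : Int) : Int := jacLoop (b.natAbs + 2) a b 1

-- while delta%2==0: delta//=2; exponent+=1   (fuel delta.natAbs+1 always suffices
-- on inputs where the Python terminates; exponent is a loop counter, kept as Nat)
def stripTwos : Nat → Int → Nat → Int × Nat
  | 0, delta, e => (delta, e)
  | f+1, delta, e =>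
    if PySem.Int.mod delta 2 = 0 then stripTwos f (PySem.Int.floordiv delta 2) (e + 1) else (delta, e)

-- ===== PORT A =====

-- the common while-loop of LucasU/LucasV: x,y,m=…; while n>=m: z=p*y-q*x; y,x=z,y; m+=1; return z.
-- returning y at exit is exact: at both call sites nn ≥ 2, so the body runs ≥ once and y holds z.
def lucasLoop (p : Int) (q : Int) (nn : Int) : Nat → Int → Int → Int → Int
  | 0, _, y, _ => y
  | f+1, x, y, m => if m ≤ nn then lucasLoop p q nn f y (p * y - q * x) (m + 1) else y

def lucasUA (k : Int) (p : Int) (q : Int) : Int :=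
  if k = 0 then 0 else if k = 1 then 1 else lucasLoop p q k k.toNat 0 1 2

def lucasVA (k : Int) (p : Int) (q : Int) : Int :=
  if k = 0 then 2 else if k = 1 then p else lucasLoop p q k k.toNat 2 p 2

-- for i in range(exponent+1): if pow(LucasV(delta*2**i,p,q),1,n)==0: return 'YES' / return 'NO'
def slucasLoopA (n : Int) (delta : Int) (p : Int) (q : Int) : Nat → Nat → String
  | _, 0 => "NO"
  | i, c+1 =>
    if PySem.Int.mod (lucasVA (delta * 2 ^ i) p q) n = 0 then "YES"
    else slucasLoopA n delta p q (i + 1) c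

def slucas (n : Int) (d : Int) (p : Int) (q : Int) : String :=
  let delta0 := n - jacobi d n
  let s := stripTwos (delta0.natAbs + 1) delta0 0
  if PySem.Int.mod (lucasUA s.1 p q) n = 0 then "YES"
  else slucasLoopA n s.1 p q 0 (s.2 + 1)

-- ===== PORT B =====

-- _upair(k,p,q,n) = (U_k % n, U_{k+1} % n) by fast doubling on k//2
def upair (k : Int) (p : Int) (q : Int) (n : Int) : Int × Int :=
  if k ≤ 0 then (0, PySem.Int.mod 1 n)
  else
    let ab := upair (PySem.Int.floordiv k 2) p q n
    let uEven := PySem.Int.mod (ab.1 * (2 * ab.2 - p * ab.1)) n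
    let uOdd := PySem.Int.mod (ab.2 * ab.2 - q * ab.1 * ab.1) n
    if PySem.Int.mod k 2 = 0 then (uEven, uOdd)
    else (uOdd, PySem.Int.mod (p * uOdd - q * uEven) n)
termination_by k.toNat
decreasing_by
  rw [PySem.Int.floordiv_eq_ediv_of_pos (by norm_num)]
  omega

-- for i in range(exponent+1): a,b=_upair(delta<<i,…); if (2*b-p*a)%n==0: return 'YES' / 'NO'
-- (delta << i = delta * 2^i exactly, since i ≥ 0)
def slucasLoopB (n : Int) (delta : Int) (p : Int) (q : Int) : Nat → Nat → String
  | _, 0 => "NO"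
  | i, c+1 =>
    let ab := upair (delta * 2 ^ i) p q n
    if PySem.Int.mod (2 * ab.2 - p * ab.1) n = 0 then "YES"
    else slucasLoopB n delta p q (i + 1) c

def slucas_alt (n : Int) (d : Int) (p : Int) (q : Int) : String :=
  let delta0 := n - jacobi d n
  let s := stripTwos (delta0.natAbs + 1) delta0 0
  if (upair s.1 p q n).1 = 0 then "YES"
  else slucasLoopB n s.1 p q 0 (s.2 + 1)

-- ===== PRECONDITION & SPEC =====
-- Pre_ excludes exactly the inputs where the Python A raises: jacobi's assert demands
-- n > 0 and n odd (AssertionError otherwise); A returns on every other input.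
def Pre_slucas (n : Int) (d : Int) (p : Int) (q : Int) : Prop := 0 < n ∧ n % 2 = 1
instance (n : Int) (d : Int) (p : Int) (q : Int) : Decidable (Pre_slucas n d p q) := by
  unfold Pre_slucas; infer_instance

def pvWitness_slucas : Int × Int × Int × Int := (5, 3, 1, -1)

def Spec_slucas (n : Int) (d : Int) (p : Int) (q : Int) (out : String) : Prop := out = slucas_alt n d p q
instance (n : Int) (d : Int) (p : Int) (q : Int) (out : String) : Decidable (Spec_slucas n d p q out) := by unfold Spec_slucas; infer_instance

-- ===== CLAIM (what is proved, stated in full; the proofs are below) =====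
def Claim_equal_slucas : Prop := ∀ (n : Int) (d : Int) (p : Int) (q : Int), Dom_slucas n d p q → Pre_slucas n d p q → Spec_slucas n d p q (slucas n d p q)

-- ===== LEMMAS AND PROOFS =====

-- the Lucas sequences U and V
def Useq (p : Int) (q : Int) : Nat → Int
  | 0 => 0
  | 1 => 1
  | (k+2) => p * Useq p q (k+1) - q * Useq p q k

def Vseq (p : Int) (q : Int) : Nat → Int
  | 0 => 2
  | 1 => p
  | (k+2) => p * Vseq p q (k+1) - q * Vseq p q k


-- lucasLoop from state (W j, W (j+1), m=j+2) computes W nn, for any sequence W obeying the recurrence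
theorem lucasLoop_inv (p q nn : Int) (W : Nat → Int)
    (hW : ∀ j, W (j+2) = p * W (j+1) - q * W j) :
    ∀ (f j : Nat), (j : Int) + 1 ≤ nn → nn ≤ (j : Int) + 1 + f →
      lucasLoop p q nn f (W j) (W (j+1)) ((j : Int) + 2) = W nn.toNat := by
  intro f
  induction f with
  | zero =>
    intro j h1 h2
    have hj : nn.toNat = j + 1 := by omega
    simp [lucasLoop, hj]
  | succ f ih =>
    intro j h1 h2
    by_cases hc : (j : Int) + 2 ≤ nn
    · have e1 : p * W (j+1) - q * W j = W ((j+1)+1) := by rw [hW j]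
      have e2 : ((j : Int) + 2) + 1 = ((j+1 : Nat) : Int) + 2 := by push_cast; ring
      have := ih (j+1) (by push_cast; omega) (by push_cast at h2 ⊢; omega)
      simp only [lucasLoop, if_pos hc, e1, e2]
      exact_mod_cast this
    · have hj : nn.toNat = j + 1 := by omega
      simp [lucasLoop, hc, hj]

theorem lucasUA_eq (k p q : Int) (hk : 0 ≤ k) : lucasUA k p q = Useq p q k.toNat := by
  rcases eq_or_ne k 0 with rfl | h0
  · simp [lucasUA, Useq]
  rcases eq_or_ne k 1 with rfl | h1
  · simp [lucasUA, Useq]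
  have hk2 : 2 ≤ k := by omega
  have := lucasLoop_inv p q k (Useq p q) (fun j => rfl) k.toNat 0 (by omega) (by omega)
  simpa [lucasUA, h0, h1, Useq] using this

theorem lucasVA_eq (k p q : Int) (hk : 0 ≤ k) : lucasVA k p q = Vseq p q k.toNat := by
  rcases eq_or_ne k 0 with rfl | h0
  · simp [lucasVA, Vseq]
  rcases eq_or_ne k 1 with rfl | h1
  · simp [lucasVA, Vseq]
  have hk2 : 2 ≤ k := by omega
  have := lucasLoop_inv p q k (Vseq p q) (fun j => rfl) k.toNat 0 (by omega) (by omega)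
  simpa [lucasVA, h0, h1, Vseq] using this

-- addition formula for U
theorem Uadd (p q : Int) : ∀ (k m : Nat),
    Useq p q (m + k + 1) = Useq p q (m+1) * Useq p q (k+1) - q * (Useq p q m * Useq p q k) := by
  intro k
  induction k using Nat.twoStepInduction with
  | zero => intro m; simp [Useq]
  | one =>
    intro m
    rw [show Useq p q (m + 1 + 1) = p * Useq p q (m+1) - q * Useq p q m from rfl]
    simp [Useq]; ring
  | more k ih1 ih2 =>
    intro m
    have e1 : m + (k+2) + 1 = (m + k + 1) + 2 := by omega
    have e2 : m + (k+1) + 1 = (m + k) + 2 := by omega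
    rw [e1, show Useq p q ((m+k+1)+2) = p * Useq p q ((m+k+1)+1) - q * Useq p q (m+k+1) from rfl,
        show (m+k+1)+1 = m + (k+1) + 1 by omega, ih2 m, ih1 m,
        show Useq p q (k+1+1+1) = p * Useq p q (k+1+1) - q * Useq p q (k+1) from rfl,
        show Useq p q (k+1+1) = p * Useq p q (k+1) - q * Useq p q k from rfl]
    ring

theorem Udouble (p q : Int) (j : Nat) :
    Useq p q (2 * j) = Useq p q j * (2 * Useq p q (j+1) - p * Useq p q j) := by
  cases j with
  | zero => simp [Useq]
  | succ s =>
    have e : 2 * (s+1) = (s+1) + s + 1 := by omega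
    rw [e, Uadd p q s (s+1),
        show Useq p q (s+1+1) = p * Useq p q (s+1) - q * Useq p q s from rfl]
    ring

theorem Uodd (p q : Int) (j : Nat) :
    Useq p q (2 * j + 1) = Useq p q (j+1) * Useq p q (j+1) - q * (Useq p q j * Useq p q j) := by
  have e : 2 * j + 1 = j + j + 1 := by omega
  rw [e, Uadd p q j j]

-- V in terms of U
theorem Vchar (p q : Int) : ∀ j, Vseq p q j = 2 * Useq p q (j+1) - p * Useq p q j := by
  intro j
  induction j using Nat.twoStepInduction with
  | zero => simp [Useq, Vseq]
  | one => simp [Useq, Vseq]; ring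
  | more k ih1 ih2 =>
    rw [show Vseq p q (k+2) = p * Vseq p q (k+1) - q * Vseq p q k from rfl, ih1, ih2,
        show Useq p q (k+2+1) = p * Useq p q (k+1+1) - q * Useq p q (k+1) from rfl,
        show Useq p q (k+1+1) = p * Useq p q (k+1) - q * Useq p q k from rfl]
    ring

-- a % n ≡ a
theorem emodMe (n a : Int) : Int.ModEq n (a % n) a := Int.emod_emod_of_dvd a dvd_rfl

-- fast doubling computes (U_k % n, U_{k+1} % n)
theorem upair_eq (p q n : Int) (hn : 0 < n) :
    ∀ j : Nat, upair (j : Int) p q n = (Useq p q j % n, Useq p q (j+1) % n) := by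
  intro j
  induction j using Nat.strong_induction_on with
  | _ j ih =>
    rcases Nat.eq_zero_or_pos j with rfl | hj
    · rw [upair]
      simp [Useq, PySem.Int.mod_eq_emod_of_pos hn]
    · rw [upair, if_neg (by exact_mod_cast Nat.not_le.mpr hj : ¬ (j : Int) ≤ 0)]
      have hfd : PySem.Int.floordiv (j : Int) 2 = ((j / 2 : Nat) : Int) := by
        rw [PySem.Int.floordiv_eq_ediv_of_pos (by norm_num)]
        omega
      have hmd : PySem.Int.mod (j : Int) 2 = ((j % 2 : Nat) : Int) := by
        rw [PySem.Int.mod_eq_emod_of_pos (by norm_num)]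
        omega
      rw [hfd, hmd, ih (j / 2) (Nat.div_lt_self hj (by norm_num))]
      set a := Useq p q (j / 2) with ha
      set b := Useq p q (j / 2 + 1) with hb
      have hEven : (a % n * (2 * (b % n) - p * (a % n))) % n
          = Useq p q (2 * (j / 2)) % n := by
        rw [Udouble]
        exact (emodMe n a).mul (((Int.ModEq.refl 2).mul (emodMe n b)).sub
          ((Int.ModEq.refl p).mul (emodMe n a)))
      have hOdd : ((b % n) * (b % n) - q * (a % n) * (a % n)) % n
          = Useq p q (2 * (j / 2) + 1) % n := by
        rw [Uodd]
        have : Int.ModEq n ((b % n) * (b % n) - q * (a % n) * (a % n))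
            (b * b - q * a * a) :=
          ((emodMe n b).mul (emodMe n b)).sub (((Int.ModEq.refl q).mul (emodMe n a)).mul (emodMe n a))
        calc ((b % n) * (b % n) - q * (a % n) * (a % n)) % n
            = (b * b - q * a * a) % n := this
          _ = (b * b - q * (a * a)) % n := by ring_nf
      rcases Nat.even_or_odd j with he | ho
      · have h2 : j % 2 = 0 := Nat.even_iff.mp he
        have hj2 : 2 * (j / 2) = j := by omega
        simp only [h2, Nat.cast_zero]
        rw [PySem.Int.mod_eq_emod_of_pos hn, PySem.Int.mod_eq_emod_of_pos hn,
            hEven, hOdd, hj2]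
        simp
      · have h2 : j % 2 = 1 := Nat.odd_iff.mp ho
        have hj2 : 2 * (j / 2) + 1 = j := by omega
        simp only [h2, Nat.cast_one, if_neg (by norm_num : ¬ (1 : Int) = 0)]
        rw [PySem.Int.mod_eq_emod_of_pos hn, PySem.Int.mod_eq_emod_of_pos hn,
            PySem.Int.mod_eq_emod_of_pos hn, hEven, hOdd, hj2]
        have hrec : Useq p q (j+1) = p * Useq p q j - q * Useq p q (2*(j/2)) := by
          conv_lhs => rw [show j + 1 = (2*(j/2)) + 2 by omega]
          rw [show Useq p q (2*(j/2)+2) = p * Useq p q (2*(j/2)+1) - q * Useq p q (2*(j/2)) from rfl,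
              hj2]
        simp only [Prod.mk.injEq, true_and]
        rw [hrec]
        exact ((Int.ModEq.refl p).mul (emodMe n _)).sub ((Int.ModEq.refl q).mul (emodMe n _))

-- jacInner keeps x in {1,-1} when y is
theorem jacInner_x (y : Int) (hy : y = 1 ∨ y = -1) :
    ∀ (f : Nat) (a x : Int), (x = 1 ∨ x = -1) →
      ((jacInner y f a x).2 = 1 ∨ (jacInner y f a x).2 = -1) := by
  intro f
  induction f with
  | zero => intro a x hx; simpa [jacInner] using hx
  | succ f ih =>
    intro a x hx
    simp only [jacInner]
    split_ifs with h
    · exact ih _ _ (by rcases hx with h1 | h1 <;> rcases hy with h2 | h2 <;> simp [h1, h2])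
    · simpa using hx

-- jacLoop only returns -1, 0 or 1 (for x in {1,-1}); fuel exhaustion returns 0
theorem jacLoop_range :
    ∀ (f : Nat) (a b x : Int), (x = 1 ∨ x = -1) →
      (jacLoop f a b x = -1 ∨ jacLoop f a b x = 0 ∨ jacLoop f a b x = 1) := by
  intro f
  induction f with
  | zero => intro a b x hx; simp [jacLoop]
  | succ f ih =>
    intro a b x hx
    simp only [jacLoop]
    by_cases h1 : PySem.Int.mod a b = 0
    · simp [h1]
    · rw [if_neg h1]
      set a1 := (if a > b ∨ a < 0 then PySem.Int.mod a b else a) with ha1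
      set y := (if PySem.Int.mod b 8 = 3 ∨ PySem.Int.mod b 8 = 5 then (-1 : Int) else 1) with hyy
      have hy : y = 1 ∨ y = -1 := by rw [hyy]; split_ifs <;> norm_num
      set s2 := jacInner y (a1.natAbs + 1) a1 x with hss
      have hx2 := jacInner_x y hy (a1.natAbs + 1) a1 x hx
      rw [← hss] at hx2
      set z := (if PySem.Int.mod s2.1 4 = PySem.Int.mod b 4 ∧ PySem.Int.mod b 4 = 3
        then (-1 : Int) else 1) with hzz
      have hz : z = 1 ∨ z = -1 := by rw [hzz]; split_ifs <;> norm_num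
      by_cases h2 : s2.1 = 1
      · rcases hx2 with h | h <;> simp [h2, h]
      · rw [if_neg h2]
        by_cases h3 : Int.gcd s2.1 b ≠ 1
        · simp [h3]
        · rw [if_neg h3]
          apply ih
          rcases hx2 with h | h <;> rcases hz with h' | h' <;> simp [h, h']

theorem jacobi_range (a b : Int) : jacobi a b = -1 ∨ jacobi a b = 0 ∨ jacobi a b = 1 :=
  jacLoop_range _ a b 1 (Or.inl rfl)

theorem jacobi_one (d : Int) : jacobi d 1 = 0 := by
  simp [jacobi, jacLoop]

-- stripping factors of two keeps the value positive
theorem strip_pos : ∀ (f : Nat) (delta : Int) (e : Nat), 0 < delta → 0 < (stripTwos f delta e).1 := by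
  intro f
  induction f with
  | zero => intro delta e h; simpa [stripTwos] using h
  | succ f ih =>
    intro delta e h
    simp only [stripTwos]
    split_ifs with hm
    · rw [PySem.Int.mod_eq_emod_of_pos two_pos] at hm
      rw [PySem.Int.floordiv_eq_ediv_of_pos two_pos]
      exact ih _ _ (by omega)
    · simpa using h

-- the two range-loops agree: the i-th tests compare V_{delta*2^i} mod n on both sides
theorem loops_eq (n p q delta : Int) (hn : 0 < n) (hd : 0 < delta) :
    ∀ (c i : Nat), slucasLoopA n delta p q i c = slucasLoopB n delta p q i c := by
  intro c
  induction c with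
  | zero => intro i; rfl
  | succ c ih =>
    intro i
    have hk : 0 < delta * 2 ^ i := mul_pos hd (pow_pos (by norm_num) i)
    have hcast : ((delta * 2 ^ i).toNat : Int) = delta * 2 ^ i := Int.toNat_of_nonneg hk.le
    have hB : upair (delta * 2 ^ i) p q n =
        (Useq p q (delta * 2 ^ i).toNat % n, Useq p q ((delta * 2 ^ i).toNat + 1) % n) := by
      conv_lhs => rw [← hcast]
      exact upair_eq p q n hn _
    have hA : PySem.Int.mod (lucasVA (delta * 2 ^ i) p q) n =
        Vseq p q (delta * 2 ^ i).toNat % n := by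
      rw [lucasVA_eq _ _ _ hk.le, PySem.Int.mod_eq_emod_of_pos hn]
    have hBc : PySem.Int.mod (2 * (Useq p q ((delta * 2 ^ i).toNat + 1) % n)
        - p * (Useq p q (delta * 2 ^ i).toNat % n)) n = Vseq p q (delta * 2 ^ i).toNat % n := by
      rw [PySem.Int.mod_eq_emod_of_pos hn, Vchar]
      exact ((Int.ModEq.refl 2).mul (emodMe n _)).sub ((Int.ModEq.refl p).mul (emodMe n _))
    simp only [slucasLoopA, slucasLoopB, hB, hA, hBc]
    split_ifs
    · rfl
    · exact ih (i + 1)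

theorem slucas_spec : Claim_equal_slucas := by
  intro n d p q _hdom hpre
  obtain ⟨hn, hodd⟩ := hpre
  have hd0 : 0 < n - jacobi d n := by
    rcases eq_or_lt_of_le (by omega : (1 : Int) ≤ n) with h1 | h1
    · rw [← h1, jacobi_one]; norm_num
    · rcases jacobi_range d n with h | h | h <;> omega
  unfold Spec_slucas
  simp only [slucas, slucas_alt]
  set s := stripTwos ((n - jacobi d n).natAbs + 1) (n - jacobi d n) 0 with hs
  have hd : 0 < s.1 := strip_pos _ _ _ hd0
  have hA : PySem.Int.mod (lucasUA s.1 p q) n = Useq p q s.1.toNat % n := by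
    rw [lucasUA_eq _ _ _ hd.le, PySem.Int.mod_eq_emod_of_pos hn]
  have hB : (upair s.1 p q n).1 = Useq p q s.1.toNat % n := by
    conv_lhs => rw [← Int.toNat_of_nonneg hd.le]
    rw [upair_eq p q n hn]
  rw [hA, hB]
  split_ifs
  · rfl
  · exact loops_eq n p q s.1 hn hd (s.2 + 1) 0
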